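-- pv_equiv track=rewrite | github.com/AbdoHerO/OCR_Image_To_Text | src/pdf_to_excel_ocr.py | extract_data_under_column_head
-- ===== SOURCE A (Python) =====
-- def extract_data_under_column_head(text, column_head):
--     index = [i for i, x in enumerate(text) if x == column_head]
--     data = []
--     for i in index:
--         # Find the next column head or end of text
--         next_index = index[index.index(i) + 1] if index.index(i) + 1 < len(index) else len(text)
--         # Extract data under the current column head
--         column_data = text[i+1:next_index]
--         data.append(column_data)
--     return data
-- ===== SOURCE B (Python) =====
-- def extract_data_under_column_head(text, column_head):
--     data = []
--     cur = None  # None = no header seen yet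
--     for x in text:
--         if x == column_head:
--             if cur is not None:
--                 data.append(cur)
--             cur = []
--         elif cur is not None:
--             cur.append(x)
--     if cur is not None:
--         data.append(cur)
--     return data
-- ===== Notes on version B (the rewrite author's own statement) =====
-- stated objective: simpler
-- what changed: Replaced the index-list construction with repeated list.index lookups and slicing by a single linear pass that flushes a 'current segment' accumulator (None sentinel = no header seen yet) at each header and at the end.
import Mathlib
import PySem

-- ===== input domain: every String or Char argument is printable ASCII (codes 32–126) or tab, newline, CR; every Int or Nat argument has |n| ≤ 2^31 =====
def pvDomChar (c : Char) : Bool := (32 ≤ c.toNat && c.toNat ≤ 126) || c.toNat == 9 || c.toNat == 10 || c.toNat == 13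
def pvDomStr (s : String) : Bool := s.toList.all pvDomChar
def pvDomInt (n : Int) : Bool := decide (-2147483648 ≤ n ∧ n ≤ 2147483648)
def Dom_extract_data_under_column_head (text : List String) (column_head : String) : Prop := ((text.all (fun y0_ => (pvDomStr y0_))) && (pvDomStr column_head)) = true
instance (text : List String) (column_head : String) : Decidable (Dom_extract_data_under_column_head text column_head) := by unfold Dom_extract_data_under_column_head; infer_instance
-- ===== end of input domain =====

-- B replaces the index-list-plus-slicing construction by one linear pass with a
-- 'current segment' accumulator (sentinel = no header seen yet); objective: simpler.

-- ===== PORT A =====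
def extract_data_under_column_head (text : List String) (column_head : String) : List (List String) :=
  let index : List Int :=
    ((PySem.List.enumerate text 0).filter (fun p => p.2 == column_head)).map (fun p => p.1)
  index.foldl (fun data i =>
    let pos : Nat := (PySem.List.index? index i).getD 0
    let next_index : Int :=
      if pos + 1 < index.length then (PySem.List.pyGet? index ((pos : Int) + 1)).getD 0
      else (text.length : Int)
    data ++ [PySem.List.slice text (some (i + 1)) (some next_index)]) []

-- ===== PORT B =====
def pvFlushB (st : List (List String) × Option (List String)) : List (List String) :=
  match st.2 with
  | some cur => st.1 ++ [cur]
  | none => st.1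

def pvStepB (column_head : String) (st : List (List String) × Option (List String))
    (x : String) : List (List String) × Option (List String) :=
  if x == column_head then (pvFlushB st, some [])
  else (st.1, st.2.map (fun cur => cur ++ [x]))

def extract_data_under_column_head_alt (text : List String) (column_head : String) : List (List String) :=
  pvFlushB (text.foldl (pvStepB column_head) ([], none))

-- ===== PRECONDITION & SPEC =====
def Spec_extract_data_under_column_head (text : List String) (column_head : String) (out : List (List String)) : Prop := out = extract_data_under_column_head_alt text column_head
instance (text : List String) (column_head : String) (out : List (List String)) : Decidable (Spec_extract_data_under_column_head text column_head out) := by unfold Spec_extract_data_under_column_head; infer_instance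

-- ===== CLAIM (what is proved, stated in full; the proofs are below) =====
def Claim_equal_extract_data_under_column_head : Prop := ∀ (text : List String) (column_head : String), Dom_extract_data_under_column_head text column_head → Spec_extract_data_under_column_head text column_head (extract_data_under_column_head text column_head)

-- ===== LEMMAS AND PROOFS =====

-- positions (0-based) of occurrences of ch in the list
def pvPosn (ch : String) : List String → List Nat
  | [] => []
  | x :: xs => if x = ch then 0 :: (pvPosn ch xs).map (· + 1) else (pvPosn ch xs).map (· + 1)

-- the segments of t determined by a list of header positions
def pvSegs (t : List String) : List Nat → List (List String)
  | [] => []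
  | j :: js => (t.drop (j + 1)).take (js.headD t.length - (j + 1)) :: pvSegs t js

-- B's segments after a header has been seen
def pvInB (ch : String) : List String → List (List String)
  | [] => [[]]
  | x :: xs => if x = ch then [] :: pvInB ch xs else (pvInB ch xs).modifyHead (x :: ·)

theorem pvInB_ne_nil (ch : String) (xs : List String) : pvInB ch xs ≠ [] := by
  induction xs with
  | nil => simp [pvInB]
  | cons x xs ih =>
    simp only [pvInB]
    split
    · simp
    · cases h : pvInB ch xs with
      | nil => exact absurd h ih
      | cons a l => simp [List.modifyHead]

theorem pvFoldB_some (ch : String) (xs : List String) :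
    ∀ (acc : List (List String)) (cur : List String),
    pvFlushB (xs.foldl (pvStepB ch) (acc, some cur)) =
      acc ++ (pvInB ch xs).modifyHead (cur ++ ·) := by
  induction xs with
  | nil => intro acc cur; simp [pvFlushB, pvInB, List.modifyHead]
  | cons x xs ih =>
    intro acc cur
    by_cases h : x = ch
    · have hb : (x == ch) = true := by simp [h]
      have hs : pvStepB ch (acc, some cur) x = (acc ++ [cur], some []) := by
        simp [pvStepB, pvFlushB, hb]
      rw [List.foldl_cons, hs, ih]
      cases hi : pvInB ch xs with
      | nil => exact absurd hi (pvInB_ne_nil ch xs)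
      | cons a l => simp [pvInB, h, hi, List.modifyHead]
    · have hb : (x == ch) = false := by simp [h]
      simp only [List.foldl_cons, pvStepB, hb, Bool.false_eq_true, if_false, Option.map_some]
      rw [ih]
      simp only [pvInB, h, if_false]
      cases hi : pvInB ch xs with
      | nil => exact absurd hi (pvInB_ne_nil ch xs)
      | cons a l => simp [List.modifyHead]

-- shift: header positions shifted by one cut the extended list the same way
theorem pvSegs_shift (t : List String) (x : String) (js : List Nat) :
    pvSegs (x :: t) (js.map (· + 1)) = pvSegs t js := by
  induction js with
  | nil => rfl
  | cons j js ih =>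
    simp only [List.map_cons, pvSegs, ih, List.drop_succ_cons]
    cases js <;> simp [List.length_cons, Nat.succ_sub_succ]

theorem pvHeadD_map_succ (l : List Nat) (n : Nat) :
    (l.map (· + 1)).headD (n + 1) = l.headD n + 1 := by
  cases l <;> simp

theorem pvInB_eq_segs (ch : String) (xs : List String) :
    pvInB ch xs = xs.take ((pvPosn ch xs).headD xs.length) :: pvSegs xs (pvPosn ch xs) := by
  induction xs with
  | nil => simp [pvInB, pvPosn, pvSegs]
  | cons x xs ih =>
    by_cases h : x = ch
    · simp only [pvInB, h, if_true, pvPosn, List.take_zero, pvSegs, List.headD_cons,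
        List.length_cons, pvSegs_shift, pvHeadD_map_succ]
      rw [ih]
      simp
    · simp only [pvInB, h, if_false, pvPosn, List.length_cons, pvHeadD_map_succ,
        pvSegs_shift, List.take_succ_cons]
      rw [ih]
      simp [List.modifyHead]

theorem pvFoldB_none (ch : String) (xs : List String) :
    ∀ (acc : List (List String)),
    pvFlushB (xs.foldl (pvStepB ch) (acc, none)) =
      acc ++ pvSegs xs (pvPosn ch xs) := by
  induction xs with
  | nil => intro acc; simp [pvFlushB, pvPosn, pvSegs]
  | cons x xs ih =>
    intro acc
    by_cases h : x = ch
    · have hs : pvStepB ch (acc, none) x = (acc, some []) := by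
        simp [pvStepB, pvFlushB, h]
      rw [List.foldl_cons, hs, pvFoldB_some]
      have hm : (pvInB ch xs).modifyHead ([] ++ ·) = pvInB ch xs := by
        cases hi : pvInB ch xs with
        | nil => exact absurd hi (pvInB_ne_nil ch xs)
        | cons a l => simp [List.modifyHead]
      rw [hm, pvInB_eq_segs]
      simp only [pvPosn, h, if_true, pvSegs, List.drop_succ_cons, List.drop_zero,
        pvSegs_shift, List.length_cons, pvHeadD_map_succ]
      simp
    · have hs : pvStepB ch (acc, none) x = (acc, none) := by simp [pvStepB, h]
      rw [List.foldl_cons, hs, ih]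
      simp [pvPosn, h, pvSegs_shift]

-- the filtered-enumerate index list is pvPosn, shifted by the start offset
theorem pvIndex_eq (ch : String) (xs : List String) :
    ∀ (s : Int),
    ((PySem.List.enumerate xs s).filter (fun p => p.2 == ch)).map (fun p => p.1) =
      (pvPosn ch xs).map (fun (j : Nat) => s + (j : Int)) := by
  induction xs with
  | nil => intro s; simp [PySem.List.enumerate_nil, pvPosn]
  | cons x xs ih =>
    intro s
    rw [PySem.List.enumerate_cons]
    by_cases h : x = ch
    · rw [List.filter_cons_of_pos (by simpa using h), List.map_cons, ih (s + 1),
        show pvPosn ch (x :: xs) = 0 :: (pvPosn ch xs).map (· + 1) by simp [pvPosn, h],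
        List.map_cons, List.map_map]
      refine congrArg₂ List.cons (by simp) (List.map_congr_left fun j _ => ?_)
      simp only [Function.comp_apply]
      push_cast
      ring
    · rw [List.filter_cons_of_neg (by simpa using h), ih (s + 1),
        show pvPosn ch (x :: xs) = (pvPosn ch xs).map (· + 1) by simp [pvPosn, h],
        List.map_map]
      refine List.map_congr_left fun j _ => ?_
      simp only [Function.comp_apply]
      push_cast
      ring

theorem pvPosn_pairwise (ch : String) (xs : List String) :
    (pvPosn ch xs).Pairwise (· < ·) := by
  induction xs with
  | nil => simp [pvPosn]
  | cons x xs ih =>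
    have hm : ((pvPosn ch xs).map (· + 1)).Pairwise (· < ·) := by
      rw [List.pairwise_map]
      exact ih.imp (by omega)
    by_cases h : x = ch
    · simp only [pvPosn, h, if_true, List.pairwise_cons]
      exact ⟨by intro b hb; simp only [List.mem_map] at hb; omega, hm⟩
    · simpa [pvPosn, h] using hm

-- A's fold over a suffix of the (nodup) index list produces the segments of that suffix
theorem pvAFold (t : List String) (J : List Nat) :
    ∀ (pre : List Nat) (data : List (List String)),
    (((pre ++ J).map (fun j : Nat => (j : Int)))).Nodup →
    (J.map (fun j : Nat => (j : Int))).foldl (fun data i =>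
      let index := (pre ++ J).map (fun j : Nat => (j : Int))
      let pos : Nat := (PySem.List.index? index i).getD 0
      let next_index : Int :=
        if pos + 1 < index.length then (PySem.List.pyGet? index ((pos : Int) + 1)).getD 0
        else (t.length : Int)
      data ++ [PySem.List.slice t (some (i + 1)) (some next_index)]) data =
      data ++ pvSegs t J := by
  induction J with
  | nil => intro pre data _; simp [pvSegs]
  | cons j js ih =>
    intro pre data hnd
    have hfull : (pre ++ j :: js).map (fun j : Nat => (j : Int)) =
        pre.map (fun j : Nat => (j : Int)) ++ (j : Int) :: js.map (fun j : Nat => (j : Int)) := by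
      simp
    have hnotmem : ((j : Int)) ∉ pre.map (fun j : Nat => (j : Int)) := by
      rw [hfull] at hnd
      rcases List.nodup_append.mp hnd with ⟨-, -, hdisj⟩
      exact fun hm => hdisj _ hm _ List.mem_cons_self rfl
    have hidx : PySem.List.index? ((pre ++ j :: js).map (fun j : Nat => (j : Int))) (j : Int) =
        some pre.length := by
      rw [PySem.List.index?_eq_some_iff]
      exact ⟨pre.map (fun j : Nat => (j : Int)), js.map (fun j : Nat => (j : Int)),
        hfull, by simp, hnotmem⟩
    rw [List.map_cons, List.foldl_cons]
    cases js with
    | nil =>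
      have hcond : ¬ (pre.length + 1 < ((pre ++ [j]).map (fun j : Nat => (j : Int))).length) := by
        simp
      simp only [List.map_nil, List.foldl_nil, hidx, Option.getD_some, hcond, if_false, pvSegs,
        List.headD_nil]
      have hsl : PySem.List.slice t (some ((j : Int) + 1)) (some (t.length : Int)) =
          (t.drop (j + 1)).take (t.length - (j + 1)) := by
        rw [show ((j : Int) + 1) = ((j + 1 : Nat) : Int) by push_cast; ring]
        exact PySem.List.slice_natCast ..
      rw [hsl]
    | cons j' js' =>
      have hcond : pre.length + 1 < ((pre ++ j :: j' :: js').map (fun j : Nat => (j : Int))).length := by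
        simp
      have hget : PySem.List.pyGet? ((pre ++ j :: j' :: js').map (fun j : Nat => (j : Int)))
          (((pre.length : Nat) : Int) + 1) = some ((j' : Int)) := by
        rw [show (((pre.length : Nat) : Int) + 1) = ((pre.length + 1 : Nat) : Int) by push_cast; ring,
          PySem.List.pyGet?_natCast, hfull]
        rw [List.getElem?_append_right (by simp)]
        simp
      simp only [hidx, Option.getD_some, hcond, if_true, hget]
      rw [show pre ++ j :: j' :: js' = (pre ++ [j]) ++ j' :: js' from by simp] at hnd ⊢
      rw [ih (pre ++ [j]) _ hnd]
      simp only [pvSegs, List.headD_cons, List.append_assoc, List.singleton_append]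
      rw [show ((j : Int) + 1) = ((j + 1 : Nat) : Int) by push_cast; ring,
        PySem.List.slice_natCast]

-- ===== VERDICT (by name: the statement is the Claim_ definition above) =====
theorem extract_data_under_column_head_spec : Claim_equal_extract_data_under_column_head := by
  intro text ch _
  unfold Spec_extract_data_under_column_head
  have hB : extract_data_under_column_head_alt text ch = pvSegs text (pvPosn ch text) := by
    unfold extract_data_under_column_head_alt
    simpa using pvFoldB_none ch text []
  have hnd : ((pvPosn ch text).map (fun j : Nat => (j : Int))).Nodup :=
    (List.pairwise_map.mpr ((pvPosn_pairwise ch text).imp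
      (fun h => by exact_mod_cast h))).imp (fun h => ne_of_lt h)
  have hA := pvAFold text (pvPosn ch text) [] [] (by simpa using hnd)
  rw [hB]
  unfold extract_data_under_column_head
  rw [pvIndex_eq ch text 0,
    show (fun (j : Nat) => (0 : Int) + (j : Int)) = (fun (j : Nat) => (j : Int)) from
      funext fun j => by simp]
  exact hA
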